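-- pv_equiv track=rewrite | github.com/Valentino1994/dayAlgorithm | onedayAlgorithm/2022/Test/221105/t1.py | solution
-- ===== SOURCE A (Python) =====
-- def solution(line):
--
--     answer = ''
--     now = line[0]
--     flag = False
--     for i in range(1, len(line)):
--         # 같으면 그냥 넘어간다.
--         # 같은게 있다고 체크한 후 answer에 넣지 않고 넘어간다.
--         if line[i] == now:
--             flag = True
--             continue
--
--         # 다르면 answer에 now를 추가
--         else:
--             answer += now
--             now = line[i]
--             if flag:
--                 answer += "*"
--                 flag = False
--
--     if flag:
--         answer += now
--         answer += "*"
--     else: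
--         answer += now
--
--     return answer
-- ===== SOURCE B (Python) =====
-- def solution(line):
--     out = []
--     i = 0
--     n = len(line)
--     while i < n:
--         j = i
--         while j < n and line[j] == line[i]:
--             j += 1
--         out.append(line[i] if j - i == 1 else line[i] + '*')
--         i = j
--     return ''.join(out)
-- ===== Notes on version B (the rewrite author's own statement) =====
-- stated objective: alternative
-- what changed: Replaces A's char-by-char state machine (answer string, current char, repeat flag) with two-pointer maximal-run extraction: each run is scanned as a block and emits its char, starred when the run is longer than 1, joined at the end.
import Mathlib
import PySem

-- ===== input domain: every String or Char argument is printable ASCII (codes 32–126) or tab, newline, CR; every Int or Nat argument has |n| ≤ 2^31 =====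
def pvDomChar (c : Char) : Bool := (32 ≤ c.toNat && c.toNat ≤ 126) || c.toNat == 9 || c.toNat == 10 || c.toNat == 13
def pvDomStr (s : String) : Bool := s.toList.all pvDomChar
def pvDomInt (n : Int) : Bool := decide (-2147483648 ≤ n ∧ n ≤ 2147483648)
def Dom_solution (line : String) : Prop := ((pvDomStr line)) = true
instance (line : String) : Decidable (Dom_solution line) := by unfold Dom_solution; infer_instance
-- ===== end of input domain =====

-- B replaces A's char-by-char state machine (answer/now/flag) with two-pointer maximal-run
-- extraction; same return value on every nonempty string (A raises IndexError on "").

-- ===== PORT A =====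
-- A's loop state is (answer, now, flag); the loop body is folded over line[1:].
def solutionStep (st : List Char × Char × Bool) (ch : Char) : List Char × Char × Bool :=
  match st with
  | (answer, now, flag) =>
    if ch == now then (answer, now, true)
    else (answer ++ [now] ++ (if flag then ['*'] else []), ch, false)

def solution (line : String) : String :=
  match line.toList with
  | [] => ""   -- A raises IndexError here (line[0]); excluded by Pre_solution
  | c :: rest =>
    match rest.foldl solutionStep ([], c, false) with
    | (answer, now, flag) =>
      String.ofList (if flag then answer ++ [now, '*'] else answer ++ [now])

-- ===== PORT B =====
-- B: peel off the maximal run of the leading char, emit it (char, or char+'*' if longer), recurse.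
def solutionRuns : List Char → List Char
  | [] => []
  | c :: rest =>
    let run := rest.takeWhile (· == c)
    let rest' := rest.dropWhile (· == c)
    (if run.isEmpty then [c] else [c, '*']) ++ solutionRuns rest'
termination_by l => l.length
decreasing_by
  simp only [List.length_cons]
  exact Nat.lt_succ_of_le (List.length_dropWhile_le _ _)

def solution_alt (line : String) : String := String.ofList (solutionRuns line.toList)

-- ===== PRECONDITION & SPEC =====
def Pre_solution (line : String) : Prop := line ≠ ""
instance (line : String) : Decidable (Pre_solution line) := by unfold Pre_solution; infer_instance
def pvWitness_solution : String := "aab"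

def Spec_solution (line : String) (out : String) : Prop := out = solution_alt line
instance (line : String) (out : String) : Decidable (Spec_solution line out) := by unfold Spec_solution; infer_instance

-- ===== CLAIM (what is proved, stated in full; the proofs are below) =====
def Claim_equal_solution : Prop := ∀ (line : String), Dom_solution line → Pre_solution line → Spec_solution line (solution line)

-- ===== LEMMAS AND PROOFS =====

def solutionFin (st : List Char × Char × Bool) : List Char :=
  match st with
  | (answer, now, flag) => if flag then answer ++ [now, '*'] else answer ++ [now]

-- answer is only ever appended to: it factors out of the fold.
theorem solutionFin_prefix (l : List Char) (ans : List Char) (c : Char) (fl : Bool) :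
    solutionFin (l.foldl solutionStep (ans, c, fl)) =
      ans ++ solutionFin (l.foldl solutionStep ([], c, fl)) := by
  induction l generalizing ans c fl with
  | nil => cases fl <;> simp [solutionFin]
  | cons d t ih =>
    simp only [List.foldl_cons, solutionStep]
    by_cases h : (d == c) = true
    · simp only [if_pos h]
      exact ih ans c true
    · simp only [if_neg h]
      rw [ih (ans ++ [c] ++ (if fl then ['*'] else [])) d false,
          ih ([] ++ [c] ++ (if fl then ['*'] else [])) d false]
      simp

-- folding over a run of chars equal to c only turns the flag on (if the run is nonempty).
theorem fold_run (run : List Char) (rest : List Char) (ans : List Char) (c : Char) (fl : Bool)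
    (h : ∀ x ∈ run, (x == c) = true) :
    (run ++ rest).foldl solutionStep (ans, c, fl) =
      rest.foldl solutionStep (ans, c, fl || !run.isEmpty) := by
  induction run generalizing fl with
  | nil => simp
  | cons d t ih =>
    have hd : (d == c) = true := h d (by simp)
    have h' : ∀ x ∈ t, (x == c) = true := fun x hx => h x (by simp [hx])
    simp only [List.cons_append, List.foldl_cons, solutionStep, if_pos hd]
    rw [ih true h']
    simp

theorem dropWhile_head_false {p : Char → Bool} {l : List Char} {d : Char} {t : List Char}
    (h : l.dropWhile p = d :: t) : p d = false := by
  induction l with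
  | nil => simp [List.dropWhile] at h
  | cons a l ih =>
    by_cases ha : p a = true
    · exact ih (by simpa [List.dropWhile, ha] using h)
    · simp [List.dropWhile, ha] at h
      simp [← h.1, ha]

theorem main_lemma : ∀ n (l : List Char), l.length ≤ n → ∀ c : Char,
    solutionFin (l.foldl solutionStep ([], c, false)) = solutionRuns (c :: l) := by
  intro n
  induction n with
  | zero =>
    intro l hl c
    have : l = [] := List.eq_nil_of_length_eq_zero (Nat.le_zero.mp hl)
    subst this
    simp [solutionRuns, solutionFin]
  | succ n ih =>
    intro l hl c
    have hsplit : l = l.takeWhile (· == c) ++ l.dropWhile (· == c) :=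
      (List.takeWhile_append_dropWhile).symm
    rw [solutionRuns]
    conv_lhs => rw [hsplit]
    rw [fold_run _ _ _ _ _ (fun x hx => by simpa using List.mem_takeWhile_imp hx)]
    cases hd : l.dropWhile (· == c) with
    | nil =>
      simp only [List.foldl_nil, solutionFin, solutionRuns, Bool.false_or]
      cases (l.takeWhile (· == c)).isEmpty <;> simp
    | cons d t =>
      have hne : (d == c) = false := dropWhile_head_false (p := fun x => x == c) (l := l) hd
      simp only [List.foldl_cons, solutionStep, hne, Bool.false_eq_true, if_false]
      have htlen : t.length ≤ n := by
        have h1 : (d :: t).length ≤ l.length := by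
          rw [← hd]; exact List.length_dropWhile_le _ _
        simp only [List.length_cons] at h1
        omega
      rw [solutionFin_prefix, ih t htlen d]
      cases (l.takeWhile (· == c)).isEmpty <;> simp

-- ===== VERDICT (by name: the statement is the Claim_ definition above) =====
theorem solution_spec : Claim_equal_solution := by
  intro line _ hpre
  unfold Spec_solution solution solution_alt
  cases hl : line.toList with
  | nil =>
    exfalso
    apply hpre
    rw [← (String.ofList_toList : String.ofList line.toList = line), hl]
  | cons c rest =>
    have hmain := main_lemma rest.length rest le_rfl c
    simp only [solutionFin] at hmain
    rw [← hmain]
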